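-- pv_equiv track=rewrite | github.com/mnets/pymnet | pymnet/graphlets/graphlets.py | list_orbits
-- ===== SOURCE A (Python) =====
-- def list_orbits(auts):
--     '''
--     Lists all orbits
--
--     Parameters
--     ----------
--     auts: dd (key: (n_nodes, net_index, node), value: node)
--         Automorphism orbits
--
--     Returns
--     -------
--     orbit_lists: dict (key: n_nodes, value: list of orbits)
--     '''
--
--     orbit_lists = {}
--     for key in auts:
--         n_nodes = key[0]
--         net_i = key[1]
--         orbit = auts[key]
--         if not n_nodes in orbit_lists:
--             orbit_lists[n_nodes] = []
--         if not (n_nodes, net_i, orbit) in orbit_lists[n_nodes]: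
--             orbit_lists[n_nodes].append((n_nodes, net_i, orbit))
--
--     return orbit_lists
-- ===== SOURCE B (Python) =====
-- def list_orbits(auts):
--     # Flatten the dict to the sequence of (n_nodes, net_i, orbit) tuples.
--     tuples = [(k[0], k[1], auts[k]) for k in auts]
--     # Bucket unconditionally by n_nodes (no membership tests), first-seen key order.
--     groups = {}
--     for t in tuples:
--         groups.setdefault(t[0], []).append(t)
--     # Deduplicate each group independently, by successive filtering: take the
--     # head, drop every later copy of it from the remainder, repeat (nub).
--     # A duplicate tuple always lands in the same bucket, so this equals a
--     # global first-occurrence dedup.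
--     orbit_lists = {}
--     for n in groups:
--         uniq = []
--         rest = groups[n]
--         while rest:
--             h = rest[0]
--             uniq.append(h)
--             rest = [t for t in rest[1:] if t != h]
--         orbit_lists[n] = uniq
--     return orbit_lists
-- ===== Notes on version B (the rewrite author's own statement) =====
-- stated objective: alternative
-- what changed: Instead of A's single interleaved loop (create group on demand, linear membership test, conditional append), B buckets every tuple unconditionally by n_nodes and then deduplicates each bucket in a separate phase by successive filtering (nub: take the head, filter its copies out of the remainder), relying on the fact that duplicate tuples always share a bucket.
import Mathlib
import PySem

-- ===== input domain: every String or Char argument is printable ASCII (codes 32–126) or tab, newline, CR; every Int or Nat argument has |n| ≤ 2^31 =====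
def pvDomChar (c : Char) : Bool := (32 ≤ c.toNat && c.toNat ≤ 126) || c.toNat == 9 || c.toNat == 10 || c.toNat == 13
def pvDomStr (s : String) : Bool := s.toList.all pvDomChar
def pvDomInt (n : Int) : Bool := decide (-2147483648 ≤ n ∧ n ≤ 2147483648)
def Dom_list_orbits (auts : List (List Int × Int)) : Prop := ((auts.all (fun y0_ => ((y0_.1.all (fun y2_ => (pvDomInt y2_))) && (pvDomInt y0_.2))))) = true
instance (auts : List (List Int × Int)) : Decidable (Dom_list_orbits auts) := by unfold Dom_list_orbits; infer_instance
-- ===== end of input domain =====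

-- B replaces A's interleaved loop (create-group / membership-test / append) by staged
-- passes with no accumulator membership tests: flatten, bucket unconditionally by
-- n_nodes, then deduplicate each bucket by successive filtering (nub).

-- ===== PORT A =====
-- one interleaved loop: ensure the group exists, then append the tuple if the group lacks it
def list_orbits (auts : List (List Int × Int)) : List (Int × List (List Int)) :=
  (auts.foldl (fun (ol : PySem.Dict Int (List (List Int))) kv =>
      match PySem.List.pyGet? kv.1 0, PySem.List.pyGet? kv.1 1 with
      | some n, some i =>
          let ol := if ol.contains n then ol else ol.insert n []
          let t := [n, i, kv.2]
          if (ol.getD n []).contains t then ol else ol.modify n [] (· ++ [t])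
      | _, _ => ol   -- key[0] / key[1] would raise IndexError: such inputs are excluded by Pre_
    ) PySem.Dict.empty).items

-- ===== PORT B =====
-- the while-loop 'take head, filter it out of the rest' of Source B (nub by filtering)
def pyNub {α : Type} [BEq α] : List α → List α
  | [] => []
  | h :: t => h :: pyNub (t.filter (fun x => !(x == h)))
  termination_by l => l.length
  decreasing_by
    simp only [List.length_cons, List.length_unattach]
    exact Nat.lt_succ_of_le (le_trans (List.length_filter_le _ _) (by simp))

-- flatten; bucket unconditionally by n_nodes; then nub each bucket by filtering
def list_orbits_alt (auts : List (List Int × Int)) : List (Int × List (List Int)) :=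
  let tuples := auts.map (fun kv =>
      match PySem.List.pyGet? kv.1 0 with
      | none => []    -- k[0] would raise IndexError: excluded by Pre_
      | some n =>
        match PySem.List.pyGet? kv.1 1 with
        | none => []  -- k[1] would raise IndexError: excluded by Pre_
        | some i => [n, i, kv.2])
  -- groups.setdefault(t[0], []).append(t)  =  modify t[0] [] (· ++ [t])
  let groups := tuples.foldl (fun (g : PySem.Dict Int (List (List Int))) t =>
      g.modify ((PySem.List.pyGet? t 0).getD 0) [] (· ++ [t])) PySem.Dict.empty
      -- t[0]; the getD default is unreachable under Pre_ (every tuple has length 3)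
  (groups.keys.foldl (fun (ol : PySem.Dict Int (List (List Int))) n =>
      ol.insert n (pyNub (groups.getD n []))) PySem.Dict.empty).items
      -- groups[n] with n drawn from groups' keys: never a KeyError, so getD is exact

-- ===== PRECONDITION & SPEC =====
-- Pre_ excludes inputs containing a key of length < 2, on which A raises IndexError at key[0]/key[1].
def Pre_list_orbits (auts : List (List Int × Int)) : Prop :=
  ∀ kv ∈ auts, 2 ≤ kv.1.length
instance (auts : List (List Int × Int)) : Decidable (Pre_list_orbits auts) := by
  unfold Pre_list_orbits; infer_instance
def pvWitness_list_orbits : (List (List Int × Int)) := [([2, 0, 1], 1), ([2, 0, 2], 1), ([3, 1, 0], 0)]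
def Spec_list_orbits (auts : List (List Int × Int)) (out : List (Int × List (List Int))) : Prop := out = list_orbits_alt auts
instance (auts : List (List Int × Int)) (out : List (Int × List (List Int))) : Decidable (Spec_list_orbits auts out) := by unfold Spec_list_orbits; infer_instance

-- ===== CLAIM (what is proved, stated in full; the proofs are below) =====
def Claim_equal_list_orbits : Prop := ∀ (auts : List (List Int × Int)), Dom_list_orbits auts → Pre_list_orbits auts → Spec_list_orbits auts (list_orbits auts)

-- ===== LEMMAS AND PROOFS =====

def pvTuple (kv : List Int × Int) : List Int :=
  match kv.1 with
  | a :: b :: _ => [a, b, kv.2]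
  | _ => []

def pvStepA (ol : PySem.Dict Int (List (List Int))) (t : List Int) : PySem.Dict Int (List (List Int)) :=
  match t with
  | n :: _ =>
      let ol := if ol.contains n then ol else ol.insert n []
      if (ol.getD n []).contains t then ol else ol.modify n [] (· ++ [t])
  | [] => ol

def pvStepB (ol : PySem.Dict Int (List (List Int))) (t : List Int) : PySem.Dict Int (List (List Int)) :=
  match t with
  | n :: _ => ol.modify n [] (· ++ [t])
  | [] => ol

theorem pvGet0 (a : Int) (r : List Int) : PySem.List.pyGet? (a::r) 0 = some a := by
  simp [PySem.List.pyGet?, PySem.List.pyIdx?]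

theorem pvGet1 (a b : Int) (r : List Int) : PySem.List.pyGet? (a::b::r) 1 = some b := by
  simp [PySem.List.pyGet?, PySem.List.pyIdx?]

theorem pvStepA_eq (D : PySem.Dict Int (List (List Int))) (m : Int) (rest : List Int) :
    pvStepA D (m :: rest) =
      if (D.getD m []).contains (m :: rest) then D else D.modify m [] (· ++ [m :: rest]) := by
  unfold pvStepA
  by_cases hc : D.contains m = true
  · simp [hc]
  · have hc' : D.contains m = false := by simpa using hc
    have hg : D.getD m [] = [] := PySem.Dict.getD_of_not_contains D [] hc'
    simp only [hc', if_false, PySem.Dict.getD_insert_self, hg, List.contains_nil,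
      if_false, Bool.false_eq_true]
    show (D.insert m []).modify m [] (· ++ [m::rest]) = D.modify m [] (· ++ [m::rest])
    show (D.insert m []).insert m (((D.insert m []).getD m []) ++ [m::rest])
        = D.insert m ((D.getD m []) ++ [m::rest])
    rw [PySem.Dict.getD_insert_self, hg, PySem.Dict.insert_insert_self]

theorem pvInv (ts : List (List Int)) (h : ∀ t ∈ ts, t ≠ []) (n : Int) (t' : List Int) :
    t' ∈ (ts.foldl pvStepA PySem.Dict.empty).getD n [] ↔ t' ∈ ts ∧ t'.headI = n := by
  induction ts using List.reverseRecOn generalizing n t' with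
  | nil => simp [PySem.Dict.getD_empty]
  | append_singleton ts t ih =>
    have hts : ∀ u ∈ ts, u ≠ [] := fun u hu => h u (List.mem_append_left _ hu)
    obtain ⟨m, rest, rfl⟩ : ∃ m rest, t = m :: rest := by
      rcases t with _ | ⟨m, rest⟩
      · exact absurd rfl (h [] (List.mem_append_right _ (List.mem_singleton_self _)))
      · exact ⟨m, rest, rfl⟩
    rw [List.foldl_append]
    simp only [List.foldl_cons, List.foldl_nil, pvStepA_eq]
    set D := ts.foldl pvStepA PySem.Dict.empty with hD
    by_cases hmem : (m :: rest) ∈ D.getD m []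
    · have hmem' : (D.getD m []).contains (m :: rest) = true := by simpa using hmem
      rw [if_pos hmem']
      have htin : (m :: rest) ∈ ts := ((ih hts m (m::rest)).1 hmem).1
      rw [ih hts n t']
      constructor
      · rintro ⟨h1, h2⟩; exact ⟨List.mem_append_left _ h1, h2⟩
      · rintro ⟨h1, h2⟩
        rcases List.mem_append.1 h1 with h1 | h1
        · exact ⟨h1, h2⟩
        · rw [List.mem_singleton.1 h1]; exact ⟨htin, by rw [← List.mem_singleton.1 h1]; exact h2⟩
    · have hmem' : ¬ (D.getD m []).contains (m :: rest) = true := by simpa using hmem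
      rw [if_neg hmem']
      rw [PySem.Dict.getD_modify]
      by_cases hn : n = m
      · subst hn
        rw [if_pos rfl, List.mem_append, List.mem_singleton, ih hts n t']
        constructor
        · rintro (⟨h1, h2⟩ | rfl)
          · exact ⟨List.mem_append_left _ h1, h2⟩
          · exact ⟨List.mem_append_right _ (List.mem_singleton_self _), rfl⟩
        · rintro ⟨h1, h2⟩
          rcases List.mem_append.1 h1 with h1 | h1
          · exact Or.inl ⟨h1, h2⟩
          · exact Or.inr (List.mem_singleton.1 h1)
      · rw [if_neg hn, ih hts n t']
        constructor
        · rintro ⟨h1, h2⟩; exact ⟨List.mem_append_left _ h1, h2⟩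
        · rintro ⟨h1, h2⟩
          rcases List.mem_append.1 h1 with h1 | h1
          · exact ⟨h1, h2⟩
          · exfalso; rw [List.mem_singleton.1 h1] at h2; simp at h2; exact hn (h2.symm)

theorem pvMain (ts : List (List Int)) (h : ∀ t ∈ ts, t ≠ []) :
    ts.foldl pvStepA PySem.Dict.empty = (PySem.List.dedup ts).foldl pvStepB PySem.Dict.empty := by
  induction ts using List.reverseRecOn with
  | nil => rfl
  | append_singleton ts t ih =>
    have hts : ∀ u ∈ ts, u ≠ [] := fun u hu => h u (List.mem_append_left _ hu)
    obtain ⟨m, rest, rfl⟩ : ∃ m rest, t = m :: rest := by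
      rcases t with _ | ⟨m, rest⟩
      · exact absurd rfl (h [] (List.mem_append_right _ (List.mem_singleton_self _)))
      · exact ⟨m, rest, rfl⟩
    rw [List.foldl_append]
    simp only [List.foldl_cons, List.foldl_nil]
    rw [pvStepA_eq, PySem.List.dedup_eq_ofList, PySem.Set.ofList_append_singleton,
      PySem.Set.add_eq_ite, ← PySem.List.dedup_eq_ofList]
    by_cases hin : (m :: rest) ∈ ts
    · have hmem : (m :: rest) ∈ (ts.foldl pvStepA PySem.Dict.empty).getD m [] :=
        (pvInv ts hts m (m :: rest)).2 ⟨hin, rfl⟩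
      rw [if_pos (by simpa using hmem),
        if_pos (by rw [PySem.List.dedup_eq_ofList]; exact (PySem.Set.mem_ofList ts _).2 hin)]
      exact ih hts
    · have hmem : (m :: rest) ∉ (ts.foldl pvStepA PySem.Dict.empty).getD m [] := by
        intro hx; exact hin ((pvInv ts hts m (m :: rest)).1 hx).1
      rw [if_neg (by simpa using hmem),
        if_neg (by rw [PySem.List.dedup_eq_ofList]; simpa using fun hx => hin ((PySem.Set.mem_ofList ts _).1 hx))]
      rw [List.foldl_append]
      simp only [List.foldl_cons, List.foldl_nil]
      rw [ih hts]
      rfl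

theorem pvPortA_eq (auts : List (List Int × Int)) (hp : ∀ kv ∈ auts, 2 ≤ kv.1.length) :
    list_orbits auts = ((auts.map pvTuple).foldl pvStepA PySem.Dict.empty).items := by
  unfold list_orbits
  rw [List.foldl_map]
  congr 1
  apply PySem.List.foldl_congr_mem
  intro acc kv hkv
  obtain ⟨a, b, r, hk⟩ : ∃ a b r, kv.1 = a :: b :: r := by
    rcases hkv1 : kv.1 with _ | ⟨a, _ | ⟨b, r⟩⟩
    · exfalso; have := hp kv hkv; rw [hkv1] at this; simp at this
    · exfalso; have := hp kv hkv; rw [hkv1] at this; simp at this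
    · exact ⟨a, b, r, rfl⟩
  rw [hk, pvGet0, pvGet1]
  simp only [pvTuple, hk, pvStepA]

-- nub-by-filtering computes first-occurrence dedup: foldl-add with a seen-set s
-- equals s ++ the nub of the elements not already in s
theorem pvNub_foldl {α : Type} [BEq α] [LawfulBEq α] (l : List α) (s : List α) :
    l.foldl PySem.Set.add s = s ++ pyNub (l.filter (fun y => !s.contains y)) := by
  induction l generalizing s with
  | nil => simp [pyNub]
  | cons a t ih =>
    simp only [List.foldl_cons]
    by_cases ha : a ∈ s
    · rw [show PySem.Set.add s a = s by
        rw [PySem.Set.add_eq_ite]; simp [ha]]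
      rw [ih s]
      congr 2
      simp [ha]
    · rw [show PySem.Set.add s a = s ++ [a] by
        rw [PySem.Set.add_eq_ite]; simp [ha]]
      rw [ih (s ++ [a])]
      have hfe : t.filter (fun y => !(s ++ [a]).contains y)
          = (t.filter (fun y => !s.contains y)).filter (fun y => !(y == a)) := by
        rw [List.filter_filter]
        apply List.filter_congr
        intro x _
        by_cases hxa : x = a <;> by_cases hxs : x ∈ s <;> simp [hxa, hxs]
      rw [hfe]
      have : pyNub ((a :: t).filter (fun y => !s.contains y))
          = a :: pyNub ((t.filter fun y => !s.contains y).filter (fun y => !(y == a))) := by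
        rw [List.filter_cons, if_pos (by simp [ha])]
        rw [pyNub]
      rw [this, List.append_assoc]
      rfl

theorem pvNub_eq_dedup {α : Type} [BEq α] [LawfulBEq α] (l : List α) :
    pyNub l = PySem.List.dedup l := by
  rw [PySem.List.dedup_eq_ofList, PySem.Set.ofList_eq_foldl, pvNub_foldl l []]
  simp

-- the grouped dict built by pvStepB, as an items list: distinct heads in first-seen
-- order, each paired with the tuples carrying that head, in order
theorem pvItems (ts : List (List Int)) (h : ∀ t ∈ ts, t ≠ []) :
    (ts.foldl pvStepB PySem.Dict.empty).items
      = (PySem.List.dedup (ts.map List.headI)).map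
          (fun n => (n, ts.filter (fun t => t.headI == n))) := by
  have hB : ts.foldl pvStepB PySem.Dict.empty
      = ts.foldl (fun (d : PySem.Dict Int (List (List Int))) t =>
          d.modify t.headI [] (· ++ [t])) PySem.Dict.empty := by
    apply PySem.List.foldl_congr_mem
    intro acc t ht
    rcases hteq : t with _ | ⟨n, r⟩
    · exact absurd hteq (h t ht)
    · simp [pvStepB]
  rw [hB]
  set d := ts.foldl (fun (d : PySem.Dict Int (List (List Int))) t =>
      d.modify t.headI [] (· ++ [t])) PySem.Dict.empty with hd
  have hkeys : d.keys = PySem.List.dedup (ts.map List.headI) := by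
    rw [hd, PySem.Dict.keys_foldl_modify_key]
    rw [PySem.List.dedup_eq_ofList, PySem.Set.ofList_eq_foldl]
    rfl
  have hnd : d.keys.Nodup := by
    rw [hkeys, PySem.List.dedup_eq_ofList]
    exact PySem.Set.nodup_ofList _
  rw [PySem.Dict.items_eq_map_keys d hnd [], hkeys]
  apply List.map_congr_left
  intro n _
  congr 1
  have hpair : ts.foldl (fun (d : PySem.Dict Int (List (List Int))) t =>
      d.modify t.headI [] (· ++ [t])) PySem.Dict.empty
      = (ts.map (fun t => (t.headI, t))).foldl
          (fun (d : PySem.Dict Int (List (List Int))) p =>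
            d.modify p.1 [] (· ++ [p.2])) PySem.Dict.empty := by
    rw [List.foldl_map]
  rw [hd, hpair, PySem.Dict.getD_foldl_modify_append]
  rw [PySem.Dict.getD_empty, List.nil_append]
  rw [List.filter_map, List.map_map]
  simp [Function.comp_def]

theorem pvDedup_filter {α : Type} [BEq α] [LawfulBEq α] (p : α → Bool) (l : List α) :
    PySem.List.dedup (l.filter p) = (PySem.List.dedup l).filter p := by
  simp only [PySem.List.dedup_eq_ofList]
  induction l using List.reverseRecOn with
  | nil => rfl
  | append_singleton l a ih =>
    rw [List.filter_append, PySem.Set.ofList_append_singleton, PySem.Set.add_eq_ite]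
    by_cases ha : a ∈ l
    · by_cases hp : p a = true
      · rw [show List.filter p [a] = [a] by simp [hp], PySem.Set.ofList_append_singleton,
          PySem.Set.add_eq_ite,
          if_pos (by simp [List.mem_filter, ha, hp, PySem.Set.mem_ofList]), ih,
          if_pos (by simp [ha])]
      · rw [show List.filter p [a] = [] by simp [hp], List.append_nil, ih,
          if_pos (by simp [ha])]
    · by_cases hp : p a = true
      · rw [show List.filter p [a] = [a] by simp [hp], PySem.Set.ofList_append_singleton,
          PySem.Set.add_eq_ite,
          if_neg (by simp [List.mem_filter, ha, PySem.Set.mem_ofList]), ih,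
          if_neg (by simp [ha]), List.filter_append,
          show List.filter p [a] = [a] by simp [hp]]
      · rw [show List.filter p [a] = [] by simp [hp], List.append_nil, ih,
          if_neg (by simp [ha]), List.filter_append,
          show List.filter p [a] = [] by simp [hp], List.append_nil]

theorem pvDedup_map_dedup {α β : Type} [BEq α] [LawfulBEq α] [BEq β] [LawfulBEq β]
    (f : α → β) (l : List α) :
    PySem.List.dedup ((PySem.List.dedup l).map f) = PySem.List.dedup (l.map f) := by
  simp only [PySem.List.dedup_eq_ofList]
  induction l using List.reverseRecOn with
  | nil => rfl
  | append_singleton l a ih =>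
    conv_lhs => rw [PySem.Set.ofList_append_singleton, PySem.Set.add_eq_ite]
    conv_rhs => rw [List.map_append, List.map_cons, List.map_nil,
      PySem.Set.ofList_append_singleton]
    by_cases ha : a ∈ l
    · rw [if_pos (by simp [ha]), ih, PySem.Set.add_eq_ite,
        if_pos (by simp [PySem.Set.mem_ofList]; exact ⟨a, ha, rfl⟩)]
    · rw [if_neg (by simp [ha]), List.map_append, List.map_cons, List.map_nil,
        PySem.Set.ofList_append_singleton, ih]

theorem pvPortB_eq (auts : List (List Int × Int)) (hp : ∀ kv ∈ auts, 2 ≤ kv.1.length) :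
    list_orbits_alt auts
      = (PySem.List.dedup ((auts.map pvTuple).map List.headI)).map
          (fun n => (n, PySem.List.dedup ((auts.map pvTuple).filter (fun t => t.headI == n)))) := by
  unfold list_orbits_alt
  have hcons : ∀ kv ∈ auts, ∃ a b r, kv.1 = a :: b :: r := by
    intro kv hkv
    rcases hkv1 : kv.1 with _ | ⟨a, _ | ⟨b, r⟩⟩
    · exfalso; have := hp kv hkv; rw [hkv1] at this; simp at this
    · exfalso; have := hp kv hkv; rw [hkv1] at this; simp at this
    · exact ⟨a, b, r, rfl⟩
  have hmap : auts.map (fun kv =>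
      match PySem.List.pyGet? kv.1 0 with
      | none => []
      | some n =>
        match PySem.List.pyGet? kv.1 1 with
        | none => []
        | some i => [n, i, kv.2]) = auts.map pvTuple := by
    apply List.map_congr_left
    intro kv hkv
    obtain ⟨a, b, r, hk⟩ := hcons kv hkv
    rw [hk, pvGet0, pvGet1]
    simp [pvTuple, hk]
  rw [hmap]
  simp only [pvNub_eq_dedup]
  have hne : ∀ t ∈ auts.map pvTuple, t ≠ [] := by
    intro t ht
    obtain ⟨kv, hkv, rfl⟩ := List.mem_map.1 ht
    obtain ⟨a, b, r, hk⟩ := hcons kv hkv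
    simp [pvTuple, hk]
  have hgrp : (auts.map pvTuple).foldl (fun (g : PySem.Dict Int (List (List Int))) t =>
        g.modify ((PySem.List.pyGet? t 0).getD 0) [] (· ++ [t])) PySem.Dict.empty
      = (auts.map pvTuple).foldl (fun (g : PySem.Dict Int (List (List Int))) t =>
        g.modify t.headI [] (· ++ [t])) PySem.Dict.empty := by
    apply PySem.List.foldl_congr_mem
    intro acc t ht
    rcases hteq : t with _ | ⟨n, r⟩
    · exact absurd hteq (hne t ht)
    · rw [pvGet0]
      rfl
  rw [hgrp]
  set T := auts.map pvTuple with hT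
  set G := T.foldl (fun (g : PySem.Dict Int (List (List Int))) t =>
      g.modify t.headI [] (· ++ [t])) PySem.Dict.empty with hG
  have hkeys : G.keys = PySem.List.dedup (T.map List.headI) := by
    rw [hG, PySem.Dict.keys_foldl_modify_key]
    rw [PySem.List.dedup_eq_ofList, PySem.Set.ofList_eq_foldl]
    rfl
  have hnd : G.keys.Nodup := by
    rw [hkeys, PySem.List.dedup_eq_ofList]
    exact PySem.Set.nodup_ofList _
  have hget : ∀ n, G.getD n [] = T.filter (fun t => t.headI == n) := by
    intro n
    have hpair : G = (T.map (fun t => (t.headI, t))).foldl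
        (fun (d : PySem.Dict Int (List (List Int))) p =>
          d.modify p.1 [] (· ++ [p.2])) PySem.Dict.empty := by
      conv_rhs => rw [List.foldl_map]
    rw [hpair, PySem.Dict.getD_foldl_modify_append, PySem.Dict.getD_empty, List.nil_append]
    rw [List.filter_map, List.map_map]
    simp [Function.comp_def]
  rw [PySem.Dict.items_foldl_insert_fresh G.keys (fun n => n)
      (fun n => PySem.List.dedup (G.getD n [])) PySem.Dict.empty
      (fun a _ => PySem.Dict.contains_empty a) (by simpa using hnd)]
  rw [show (PySem.Dict.empty : PySem.Dict Int (List (List Int))).items = [] from rfl,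
      List.nil_append, hkeys]
  apply List.map_congr_left
  intro n _
  rw [hget]

theorem pvFinal (auts : List (List Int × Int)) (hp : ∀ kv ∈ auts, 2 ≤ kv.1.length) :
    list_orbits auts = list_orbits_alt auts := by
  have hne : ∀ t ∈ auts.map pvTuple, t ≠ [] := by
    intro t ht
    obtain ⟨kv, hkv, rfl⟩ := List.mem_map.1 ht
    rcases hkv1 : kv.1 with _ | ⟨a, _ | ⟨b, r⟩⟩
    · exfalso; have := hp kv hkv; rw [hkv1] at this; simp at this
    · exfalso; have := hp kv hkv; rw [hkv1] at this; simp at this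
    · simp [pvTuple, hkv1]
  have hne' : ∀ t ∈ PySem.List.dedup (auts.map pvTuple), t ≠ [] := by
    intro t ht
    rw [PySem.List.dedup_eq_ofList] at ht
    exact hne t ((PySem.Set.mem_ofList _ _).1 ht)
  rw [pvPortA_eq auts hp, pvMain _ hne, pvItems _ hne', pvPortB_eq auts hp]
  rw [pvDedup_map_dedup]
  apply List.map_congr_left
  intro n _
  rw [pvDedup_filter]

-- ===== VERDICT (by name: the statement is the Claim_ definition above) =====
theorem list_orbits_spec : Claim_equal_list_orbits := by
  intro auts _ hpre
  unfold Spec_list_orbits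
  exact pvFinal auts hpre
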